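-- pv_equiv track=rewrite | github.com/BorosBalazsLaszlo/p-cs-rm | feladatok.py | legrovidebb_szo
-- ===== SOURCE A (Python) =====
-- def legrovidebb_szo(mondat:str)->int:
--     if len(mondat) == 0:
--         return 0
--     szavak = mondat.split()
--     #első szó hossza
--     min = len(szavak[0])
--     #vesszük az összes többi szót
--     for index in range(1, len(szavak)):
--         if len(szavak[index]) < min:
--             min = len(szavak[index])
--             #index-edik szó hossza
--     return min
-- ===== SOURCE B (Python) =====
-- def legrovidebb_szo(mondat: str) -> int:
--     if len(mondat) == 0:
--         return 0
--     szavak = mondat.split()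
--     # sort by length; the shortest word comes first (same IndexError as A on whitespace-only input)
--     return len(sorted(szavak, key=len)[0])
-- ===== Notes on version B (the rewrite author's own statement) =====
-- stated objective: idiomatic
-- what changed: Replaces the manual index loop maintaining a running minimum with a sort-by-length followed by taking the first element's length.
import Mathlib
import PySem

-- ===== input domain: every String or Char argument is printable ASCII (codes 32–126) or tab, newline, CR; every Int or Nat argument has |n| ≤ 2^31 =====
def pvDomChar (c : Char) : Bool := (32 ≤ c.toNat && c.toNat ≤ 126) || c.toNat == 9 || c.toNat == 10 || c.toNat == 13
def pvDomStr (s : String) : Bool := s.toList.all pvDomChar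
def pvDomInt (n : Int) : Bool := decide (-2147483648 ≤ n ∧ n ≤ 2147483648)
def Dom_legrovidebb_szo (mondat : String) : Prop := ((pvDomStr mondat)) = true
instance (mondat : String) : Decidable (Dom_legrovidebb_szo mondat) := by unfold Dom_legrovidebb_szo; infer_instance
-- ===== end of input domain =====

-- B replaces A's manual running-minimum loop with sort-by-length-then-take-first (idiomatic, not faster).

-- ===== PORT A =====
def legrovidebb_szo (mondat : String) : Int :=
  if PySem.Str.len mondat = 0 then 0
  else
    let szavak := PySem.Str.split₀ mondat
    match szavak with
    | [] => 0  -- szavak[0] raises IndexError in Python; excluded by Pre_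
    | w0 :: rest =>
      -- for index in range(1, len(szavak)): walk the words after the first
      rest.foldl (fun m w => if PySem.Str.len w < m then PySem.Str.len w else m)
        (PySem.Str.len w0)

-- ===== PORT B =====
def legrovidebb_szo_alt (mondat : String) : Int :=
  if PySem.Str.len mondat = 0 then 0
  else
    match PySem.List.sorted (PySem.Str.split₀ mondat) (fun w => PySem.Str.len w) false with
    | [] => 0  -- sorted(...)[0] raises IndexError in Python; excluded by Pre_
    | w :: _ => PySem.Str.len w

-- ===== PRECONDITION & SPEC =====
-- Pre_ excludes exactly the whitespace-only non-empty strings, on which both A and B raise IndexError.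
def Pre_legrovidebb_szo (mondat : String) : Prop :=
  mondat = "" ∨ PySem.Str.split₀ mondat ≠ []
instance (mondat : String) : Decidable (Pre_legrovidebb_szo mondat) := by
  unfold Pre_legrovidebb_szo; infer_instance
def pvWitness_legrovidebb_szo : String := "a bb ccc"

def Spec_legrovidebb_szo (mondat : String) (out : Int) : Prop := out = legrovidebb_szo_alt mondat
instance (mondat : String) (out : Int) : Decidable (Spec_legrovidebb_szo mondat out) := by unfold Spec_legrovidebb_szo; infer_instance

-- ===== CLAIM (what is proved, stated in full; the proofs are below) =====
def Claim_equal_legrovidebb_szo : Prop := ∀ (mondat : String), Dom_legrovidebb_szo mondat → Pre_legrovidebb_szo mondat → Spec_legrovidebb_szo mondat (legrovidebb_szo mondat)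

-- ===== LEMMAS AND PROOFS =====

-- A's fold computes a value that is the length of some word and ≤ every word's length.
theorem fold_min_spec (rest : List String) (m0 : Int) :
    (rest.foldl (fun m w => if PySem.Str.len w < m then PySem.Str.len w else m) m0 = m0 ∨
      ∃ w ∈ rest, rest.foldl (fun m w => if PySem.Str.len w < m then PySem.Str.len w else m) m0 = PySem.Str.len w) ∧
    rest.foldl (fun m w => if PySem.Str.len w < m then PySem.Str.len w else m) m0 ≤ m0 ∧
    ∀ w ∈ rest, rest.foldl (fun m w => if PySem.Str.len w < m then PySem.Str.len w else m) m0 ≤ PySem.Str.len w := by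
  induction rest generalizing m0 with
  | nil => simp
  | cons x xs ih =>
    simp only [List.foldl_cons]
    by_cases h : PySem.Str.len x < m0 <;> simp only [h, if_pos, if_false] <;>
      obtain ⟨h1, h2, h3⟩ := ih (if PySem.Str.len x < m0 then PySem.Str.len x else m0)
    · simp only [h, if_true] at h1 h2 h3
      refine ⟨?_, by omega, ?_⟩
      · rcases h1 with h1 | ⟨w, hw, hw'⟩
        · exact Or.inr ⟨x, by simp, h1⟩
        · exact Or.inr ⟨w, by simp [hw], hw'⟩
      · intro w hw
        rcases List.mem_cons.mp hw with rfl | hw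
        · omega
        · exact h3 w hw
    · simp only [h, if_false] at h1 h2 h3
      refine ⟨?_, h2, ?_⟩
      · rcases h1 with h1 | ⟨w, hw, hw'⟩
        · exact Or.inl h1
        · exact Or.inr ⟨w, by simp [hw], hw'⟩
      · intro w hw
        rcases List.mem_cons.mp hw with rfl | hw
        · omega
        · exact h3 w hw

-- The head of sorted-by-length is a word whose length is ≤ every word's length.
theorem sorted_head_spec (l : List String) (h : String) (t : List String)
    (hs : PySem.List.sorted l (fun w => PySem.Str.len w) false = h :: t) :
    h ∈ l ∧ ∀ w ∈ l, PySem.Str.len h ≤ PySem.Str.len w := by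
  have hperm := PySem.List.sorted_perm l (fun w => PySem.Str.len w) false
  rw [hs] at hperm
  have hpw := PySem.List.sorted_pairwise l (fun w => PySem.Str.len w)
  rw [hs] at hpw
  constructor
  · exact hperm.mem_iff.mp (by simp)
  · intro w hw
    have hw' : w ∈ h :: t := hperm.mem_iff.mpr hw
    rcases List.mem_cons.mp hw' with rfl | hw'
    · exact le_refl _
    · exact (List.pairwise_cons.mp hpw).1 w hw'

-- ===== VERDICT (by name: the statement is the Claim_ definition above) =====
theorem legrovidebb_szo_spec : Claim_equal_legrovidebb_szo := by
  intro mondat _ hpre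
  unfold Spec_legrovidebb_szo legrovidebb_szo legrovidebb_szo_alt
  by_cases hlen : PySem.Str.len mondat = 0
  · have hm : mondat = "" := by
      have := hlen
      simp only [PySem.Str.len_eq] at this
      have h0 : mondat.toList.length = 0 := by omega
      exact String.toList_eq_nil_iff.mp (List.length_eq_zero_iff.mp h0)
    subst hm
    simp
  · simp only [hlen, if_false]
    have hne : PySem.Str.split₀ mondat ≠ [] := by
      rcases hpre with rfl | hne
      · exact absurd (by decide : PySem.Str.len "" = 0) hlen
      · exact hne
    obtain ⟨w0, rest, hw⟩ := List.exists_cons_of_ne_nil hne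
    have hsne : PySem.List.sorted (PySem.Str.split₀ mondat) (fun w => PySem.Str.len w) false ≠ [] := by
      intro hcontra
      have := PySem.List.sorted_perm (PySem.Str.split₀ mondat) (fun w => PySem.Str.len w) false
      rw [hcontra] at this
      exact hne this.symm.eq_nil
    obtain ⟨h, t, hs⟩ := List.exists_cons_of_ne_nil hsne
    rw [hw] at hs ⊢
    rw [hs]
    dsimp only
    obtain ⟨hmem, hle⟩ := sorted_head_spec _ _ _ hs
    obtain ⟨h1, h2, h3⟩ := fold_min_spec rest (PySem.Str.len w0)
    apply le_antisymm
    · rcases List.mem_cons.mp hmem with rfl | hmem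
      · exact h2
      · exact h3 h hmem
    · rcases h1 with h1 | ⟨w, hwmem, hw'⟩
      · rw [h1]; exact hle w0 (by simp)
      · rw [hw']; exact hle w (by simp [hwmem])
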